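-- pv_equiv track=rewrite | github.com/pdung3322/sudoku1 | app.py | make_animation_boards
-- ===== SOURCE A (Python) =====
-- def make_animation_boards(initial, solved):
--     """Tạo list các board để animate: bắt đầu từ đề, rồi mỗi step điền thêm 1 ô."""
--     n = len(initial)
--     coords = [(r, c) for r in range(n) for c in range(n) if initial[r][c] == 0]
--     boards = []
--     cur = [row[:] for row in initial]
--     boards.append([row[:] for row in cur])  # step 0: đề ban đầu
--     for (r, c) in coords:
--         cur[r][c] = solved[r][c]
--         boards.append([row[:] for row in cur])
--     return boards
-- ===== SOURCE B (Python) =====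
-- def make_animation_boards(initial, solved):
--     n = len(initial)
--     coords = [(r, c) for r in range(n) for c in range(n) if initial[r][c] == 0]
--
--     def snapshot(k):
--         filled = set(coords[:k])
--         return [[solved[r][c] if (r, c) in filled else v for c, v in enumerate(row)]
--                 for r, row in enumerate(initial)]
--
--     return [snapshot(k) for k in range(len(coords) + 1)]
-- ===== Notes on version B (the rewrite author's own statement) =====
-- stated objective: alternative
-- what changed: B builds every snapshot independently as a prefix-overlay of the initial board (for each k, overlay solved values at the first k empty coordinates via enumerate + set membership) instead of threading one mutable running board through the loop and deep-copying it after each fill.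
import Mathlib
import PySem

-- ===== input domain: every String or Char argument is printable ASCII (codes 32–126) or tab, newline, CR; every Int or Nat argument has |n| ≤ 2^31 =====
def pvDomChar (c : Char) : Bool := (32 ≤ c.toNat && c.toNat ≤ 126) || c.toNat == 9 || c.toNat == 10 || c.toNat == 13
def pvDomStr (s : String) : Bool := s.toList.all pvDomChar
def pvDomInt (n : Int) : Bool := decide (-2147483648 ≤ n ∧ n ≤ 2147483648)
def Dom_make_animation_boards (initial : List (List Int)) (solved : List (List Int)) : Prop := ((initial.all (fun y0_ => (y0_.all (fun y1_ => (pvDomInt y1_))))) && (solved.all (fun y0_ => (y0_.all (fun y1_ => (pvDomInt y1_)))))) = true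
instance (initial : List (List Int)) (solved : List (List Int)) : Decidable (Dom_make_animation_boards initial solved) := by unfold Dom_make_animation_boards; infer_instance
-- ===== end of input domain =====

-- B rebuilds every snapshot independently as a prefix-overlay of the initial board instead of
-- threading a single mutable running board through the loop; objective: alternative (same cost).

-- ===== PORT A =====
-- b[r][c]: two chained Python indexings; IndexError (pyGet? = none) is excluded by Pre_, so the
-- total pyGetD form is exact on every admitted input.
def pvCell (b : List (List Int)) (r c : Int) : Int :=
  PySem.List.pyGetD (PySem.List.pyGetD b r []) c 0

-- the coords comprehension, a line both A and B contain verbatim: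
-- [(r, c) for r in range(n) for c in range(n) if initial[r][c] == 0]
def pvCoords (initial : List (List Int)) : List (Int × Int) :=
  (PySem.List.pyRange 0 (initial.length : Int) 1).flatMap (fun r =>
    (PySem.List.pyRange 0 (initial.length : Int) 1).filterMap (fun c =>
      if pvCell initial r c = 0 then some (r, c) else none))

-- cur[r][c] = solved[r][c]  (indices come from range, hence nonnegative; in range by Pre_)
def pvFill (solved cur : List (List Int)) (rc : Int × Int) : List (List Int) :=
  PySem.List.pySetD cur rc.1
    (PySem.List.pySetD (PySem.List.pyGetD cur rc.1 []) rc.2 (pvCell solved rc.1 rc.2))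

def make_animation_boards (initial : List (List Int)) (solved : List (List Int)) : List (List (List Int)) :=
  let coords := pvCoords initial
  (coords.foldl (fun st rc =>
      let cur' := pvFill solved st.1 rc
      (cur', st.2 ++ [cur'])) (initial, [initial])).2

-- ===== PORT B =====
-- snapshot(k): fresh board = initial with solved values overlaid at the first k coordinates
def pvSnapshot (initial solved : List (List Int)) (coords : List (Int × Int)) (k : Int) : List (List Int) :=
  let filled : PySem.Set (Int × Int) := PySem.Set.ofList (PySem.List.slice coords none (some k))
  (PySem.List.enumerate initial 0).map (fun p =>
    (PySem.List.enumerate p.2 0).map (fun q =>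
      if (p.1, q.1) ∈ filled then pvCell solved p.1 q.1 else q.2))

def make_animation_boards_alt (initial : List (List Int)) (solved : List (List Int)) : List (List (List Int)) :=
  let coords := pvCoords initial
  (PySem.List.pyRange 0 ((coords.length : Int) + 1) 1).map (pvSnapshot initial solved coords)

-- ===== PRECONDITION & SPEC =====
-- Pre_ excludes exactly the inputs where A raises IndexError: a row of `initial` shorter than
-- len(initial) (hit by the coords comprehension), or an empty cell whose position is missing
-- from `solved` (hit by solved[r][c]).
def Pre_make_animation_boards (initial : List (List Int)) (solved : List (List Int)) : Prop :=
  (∀ row ∈ initial, initial.length ≤ row.length) ∧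
  (∀ r ∈ List.range initial.length, ∀ c ∈ List.range initial.length,
    (initial.getD r []).getD c 0 = 0 → r < solved.length ∧ c < (solved.getD r []).length)

instance (initial : List (List Int)) (solved : List (List Int)) : Decidable (Pre_make_animation_boards initial solved) := by
  unfold Pre_make_animation_boards; infer_instance

def pvWitness_make_animation_boards : List (List Int) × List (List Int) :=
  ([[0, 1], [1, 0]], [[5, 1], [1, 6]])

def Spec_make_animation_boards (initial : List (List Int)) (solved : List (List Int)) (out : List (List (List Int))) : Prop := out = make_animation_boards_alt initial solved
instance (initial : List (List Int)) (solved : List (List Int)) (out : List (List (List Int))) : Decidable (Spec_make_animation_boards initial solved out) := by unfold Spec_make_animation_boards; infer_instance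

-- ===== CLAIM (what is proved, stated in full; the proofs are below) =====
def Claim_equal_make_animation_boards : Prop := ∀ (initial : List (List Int)) (solved : List (List Int)), Dom_make_animation_boards initial solved → Pre_make_animation_boards initial solved → Spec_make_animation_boards initial solved (make_animation_boards initial solved)

-- ===== LEMMAS AND PROOFS =====

-- Nat-indexed views of the two programs' building blocks
def pvCellN (b : List (List Int)) (r c : Nat) : Int := (b.getD r []).getD c 0

def pvSetC (b : List (List Int)) (r c : Nat) (x : Int) : List (List Int) :=
  b.set r ((b.getD r []).set c x)

def pvApplyN (solved b : List (List Int)) (cs : List (Nat × Nat)) : List (List Int) :=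
  cs.foldl (fun b rc => pvSetC b rc.1 rc.2 (pvCellN solved rc.1 rc.2)) b

def pvEmb (p : Nat × Nat) : Int × Int := ((p.1 : Int), (p.2 : Int))

def pvNCoords (initial : List (List Int)) : List (Nat × Nat) :=
  (List.range initial.length).flatMap (fun r =>
    (List.range initial.length).filterMap (fun c =>
      if pvCellN initial r c = 0 then some (r, c) else none))

lemma pvCell_natCast (b : List (List Int)) (r c : Nat) : pvCell b (r : Int) (c : Int) = pvCellN b r c := by
  simp [pvCell, pvCellN]

lemma pvCoords_eq (initial : List (List Int)) :
    pvCoords initial = (pvNCoords initial).map pvEmb := by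
  unfold pvCoords pvNCoords
  rw [PySem.List.pyRange_zero_nat, List.flatMap_map, List.map_flatMap]
  congr 1
  funext r
  rw [List.filterMap_map, List.map_filterMap]
  congr 1
  funext c
  simp only [Function.comp, pvCell_natCast]
  by_cases h : pvCellN initial r c = 0
  · simp [h, pvEmb]
  · simp [h]

lemma pvFoldBoards (f : List (List Int) → (Int × Int) → List (List Int)) :
    ∀ (cs : List (Int × Int)) (cur : List (List Int)) (boards : List (List (List Int))),
      (cs.foldl (fun st rc =>
        let cur' := f st.1 rc
        (cur', st.2 ++ [cur'])) (cur, boards)).2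
      = boards ++ (List.range cs.length).map (fun k => (cs.take (k + 1)).foldl f cur) := by
  intro cs
  induction cs with
  | nil => intro cur boards; simp
  | cons rc cs ih =>
    intro cur boards
    simp only [List.foldl_cons, List.length_cons]
    rw [ih]
    rw [List.range_succ_eq_map]
    simp [List.map_map, Function.comp, Nat.succ_eq_add_one, List.take_succ_cons,
      List.append_assoc]

lemma pvFill_emb (solved b : List (List Int)) (rc : Nat × Nat) :
    pvFill solved b (pvEmb rc) = pvSetC b rc.1 rc.2 (pvCellN solved rc.1 rc.2) := by
  simp [pvFill, pvEmb, pvSetC, pvCell_natCast]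

lemma pvSetC_row (b : List (List Int)) (r c : Nat) (x : Int) (i : Nat) :
    (pvSetC b r c x).getD i [] =
      if r = i ∧ r < b.length then (b.getD r []).set c x else b.getD i [] := by
  by_cases h : r = i
  · subst h
    by_cases hr : r < b.length
    · simp [pvSetC, List.getD_eq_getElem?_getD, hr]
    · have hle : b.length ≤ r := Nat.le_of_not_lt hr
      simp [pvSetC, List.getD_eq_getElem?_getD, hr]
  · simp [pvSetC, List.getD_eq_getElem?_getD, h]

lemma pvSetC_shape (b : List (List Int)) (r c : Nat) (x : Int) :
    (pvSetC b r c x).length = b.length ∧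
    ∀ i, ((pvSetC b r c x).getD i []).length = (b.getD i []).length := by
  refine ⟨List.length_set .., ?_⟩
  intro i
  rw [pvSetC_row]
  split_ifs with h
  · rw [List.length_set, h.1]
  · rfl

lemma pvCellN_setC (b : List (List Int)) {r c : Nat} (hr : r < b.length)
    (hc : c < (b.getD r []).length) (x : Int) (i j : Nat) :
    pvCellN (pvSetC b r c x) i j = if i = r ∧ j = c then x else pvCellN b i j := by
  unfold pvCellN
  rw [pvSetC_row]
  by_cases hi : r = i
  · subst hi
    rw [if_pos ⟨rfl, hr⟩]
    by_cases hj : c = j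
    · subst hj
      rw [if_pos ⟨rfl, rfl⟩]
      have hc' : c < (b[r]?.getD []).length := by
        rw [← List.getD_eq_getElem?_getD]; exact hc
      simp [List.getD_eq_getElem?_getD, hc']
    · rw [if_neg (by tauto)]
      simp [List.getD_eq_getElem?_getD, hj]
  · rw [if_neg (by tauto), if_neg (by tauto)]

lemma pvApplyN_shape (solved : List (List Int)) :
    ∀ (cs : List (Nat × Nat)) (b : List (List Int)),
      (pvApplyN solved b cs).length = b.length ∧
      ∀ i, ((pvApplyN solved b cs).getD i []).length = (b.getD i []).length := by
  intro cs
  induction cs with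
  | nil => intro b; exact ⟨rfl, fun _ => rfl⟩
  | cons rc cs ih =>
    intro b
    have e : pvApplyN solved b (rc :: cs)
        = pvApplyN solved (pvSetC b rc.1 rc.2 (pvCellN solved rc.1 rc.2)) cs := rfl
    obtain ⟨s1, s2⟩ := pvSetC_shape b rc.1 rc.2 (pvCellN solved rc.1 rc.2)
    obtain ⟨h1, h2⟩ := ih (pvSetC b rc.1 rc.2 (pvCellN solved rc.1 rc.2))
    exact ⟨by rw [e, h1, s1], fun i => by rw [e, h2 i, s2 i]⟩

lemma pvApplyN_cell (solved : List (List Int)) :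
    ∀ (cs : List (Nat × Nat)) (b : List (List Int)),
      (∀ rc ∈ cs, rc.1 < b.length ∧ rc.2 < (b.getD rc.1 []).length) →
      ∀ i j, pvCellN (pvApplyN solved b cs) i j
        = if (i, j) ∈ cs then pvCellN solved i j else pvCellN b i j := by
  intro cs
  induction cs with
  | nil => intro b _ i j; simp [pvApplyN]
  | cons rc cs ih =>
    intro b hb i j
    have hrc := hb rc List.mem_cons_self
    have e : pvApplyN solved b (rc :: cs)
        = pvApplyN solved (pvSetC b rc.1 rc.2 (pvCellN solved rc.1 rc.2)) cs := rfl
    obtain ⟨s1, s2⟩ := pvSetC_shape b rc.1 rc.2 (pvCellN solved rc.1 rc.2)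
    have hb' : ∀ rc' ∈ cs, rc'.1 < (pvSetC b rc.1 rc.2 (pvCellN solved rc.1 rc.2)).length ∧
        rc'.2 < ((pvSetC b rc.1 rc.2 (pvCellN solved rc.1 rc.2)).getD rc'.1 []).length := by
      intro rc' h'
      rw [s1, s2 rc'.1]
      exact hb rc' (List.mem_cons_of_mem _ h')
    rw [e, ih _ hb' i j, pvCellN_setC b hrc.1 hrc.2]
    by_cases h1 : (i, j) ∈ cs
    · simp [h1, List.mem_cons]
    · by_cases h2 : i = rc.1 ∧ j = rc.2
      · obtain ⟨hi, hj⟩ := h2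
        subst hi; subst hj
        simp [h1, List.mem_cons]
      · have h3 : ¬((i, j) = rc) := by
          intro he
          exact h2 ⟨(congrArg Prod.fst he), (congrArg Prod.snd he)⟩
        simp [h1, h2, h3, List.mem_cons]

lemma pvSnapshot_eq (initial solved : List (List Int)) (cs : List (Nat × Nat))
    (hcs : ∀ rc ∈ cs, rc.1 < initial.length ∧ rc.2 < (initial.getD rc.1 []).length)
    (k : Nat) :
    pvSnapshot initial solved (cs.map pvEmb) (k : Int) = pvApplyN solved initial (cs.take k) := by
  have hL : (pvApplyN solved initial (cs.take k)).length = initial.length :=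
    (pvApplyN_shape solved (cs.take k) initial).1
  have hlen : ∀ i, ((pvApplyN solved initial (cs.take k)).getD i []).length
      = (initial.getD i []).length := (pvApplyN_shape solved (cs.take k) initial).2
  have hbnd : ∀ rc ∈ cs.take k, rc.1 < initial.length ∧ rc.2 < (initial.getD rc.1 []).length :=
    fun rc h => hcs rc (List.take_subset k cs h)
  have hcell := pvApplyN_cell solved (cs.take k) initial hbnd
  have hmem : ∀ (i j : Nat),
      (((i : Int), (j : Int)) ∈ PySem.Set.ofList
        (PySem.List.slice (cs.map pvEmb) none (some (k : Int)))) ↔ (i, j) ∈ cs.take k := by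
    intro i j
    rw [PySem.List.slice_to_natCast, ← List.map_take, PySem.Set.mem_ofList, List.mem_map]
    constructor
    · rintro ⟨⟨p1, p2⟩, hp, he⟩
      simp only [pvEmb, Prod.ext_iff, Int.natCast_inj] at he
      obtain ⟨h1, h2⟩ := he
      subst h1; subst h2
      exact hp
    · intro hp
      exact ⟨(i, j), hp, rfl⟩
  simp only [pvSnapshot]
  apply List.ext_getElem
  · simp [PySem.List.length_enumerate, hL]
  intro i hi1 hi2
  have hi : i < initial.length := by
    simpa [PySem.List.length_enumerate] using hi1
  have hi' : i < (PySem.List.enumerate initial 0).length := by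
    simpa [PySem.List.length_enumerate] using hi
  rw [List.getElem_map (h := hi1)]
  rw [PySem.List.getElem_enumerate initial 0 i hi']
  have hrowA : (pvApplyN solved initial (cs.take k))[i]
      = (pvApplyN solved initial (cs.take k)).getD i [] :=
    (List.getD_eq_getElem _ [] (hL ▸ hi)).symm
  apply List.ext_getElem
  · simp only [List.length_map, PySem.List.length_enumerate]
    rw [hrowA, hlen i, List.getD_eq_getElem _ [] hi]
  intro j hj1 hj2
  have hj : j < initial[i].length := by
    simpa [PySem.List.length_enumerate] using hj1
  have hj' : j < (PySem.List.enumerate initial[i] 0).length := by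
    simpa [PySem.List.length_enumerate] using hj
  rw [List.getElem_map (h := hj1)]
  rw [PySem.List.getElem_enumerate initial[i] 0 j hj']
  have hgi : initial.getD i [] = initial[i] := List.getD_eq_getElem _ [] hi
  have hcellB : (pvApplyN solved initial (cs.take k))[i][j]
      = pvCellN (pvApplyN solved initial (cs.take k)) i j := by
    unfold pvCellN
    rw [← hrowA, List.getD_eq_getElem _ 0 hj2]
  rw [hcellB, hcell i j]
  have hini : pvCellN initial i j = initial[i][j] := by
    unfold pvCellN
    rw [hgi, List.getD_eq_getElem _ 0 hj]
  simp only [zero_add]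
  by_cases hm : (i, j) ∈ cs.take k
  · rw [if_pos ((hmem i j).mpr hm), if_pos hm, pvCell_natCast]
  · rw [if_neg (fun h => hm ((hmem i j).mp h)), if_neg hm, hini]

lemma pvNCoords_bounds (initial : List (List Int))
    (h : ∀ row ∈ initial, initial.length ≤ row.length) :
    ∀ rc ∈ pvNCoords initial, rc.1 < initial.length ∧ rc.2 < (initial.getD rc.1 []).length := by
  intro rc hrc
  unfold pvNCoords at hrc
  rw [List.mem_flatMap] at hrc
  obtain ⟨r, hr0, hrc⟩ := hrc
  rw [List.mem_range] at hr0
  rw [List.mem_filterMap] at hrc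
  obtain ⟨c, hc0, he⟩ := hrc
  rw [List.mem_range] at hc0
  by_cases hz : pvCellN initial r c = 0
  · rw [if_pos hz] at he
    cases he
    refine ⟨hr0, ?_⟩
    have hrow : initial.getD r [] ∈ initial := by
      rw [List.getD_eq_getElem _ [] hr0]
      exact List.getElem_mem hr0
    exact Nat.lt_of_lt_of_le hc0 (h _ hrow)
  · rw [if_neg hz] at he
    exact absurd he (by simp)

-- ===== VERDICT (by name: the statement is the Claim_ definition above) =====
lemma pvFoldPre (initial solved : List (List Int)) (pre : List (Nat × Nat)) :
    ((pre.map pvEmb).foldl (pvFill solved) initial) = pvApplyN solved initial pre := by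
  rw [List.foldl_map]
  unfold pvApplyN
  congr 1
  funext b rc
  exact pvFill_emb solved b rc

-- ===== VERDICT (by name: the statement is the Claim_ definition above) =====
theorem make_animation_boards_spec : Claim_equal_make_animation_boards := by
  intro initial solved _ hpre
  unfold Spec_make_animation_boards
  have hbnd := pvNCoords_bounds initial hpre.1
  simp only [make_animation_boards, make_animation_boards_alt]
  rw [pvCoords_eq]
  rw [pvFoldBoards (pvFill solved)]
  have hm : ((pvNCoords initial).map pvEmb).length = (pvNCoords initial).length :=
    List.length_map ..
  rw [hm]
  have hc1 : ((((pvNCoords initial).length : Nat) : Int) + 1)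
      = (((pvNCoords initial).length + 1 : Nat) : Int) := by push_cast; ring
  rw [hc1, PySem.List.pyRange_zero_nat, List.map_map]
  have hsnap : ∀ kk : Nat,
      pvSnapshot initial solved ((pvNCoords initial).map pvEmb) (kk : Int)
        = pvApplyN solved initial ((pvNCoords initial).take kk) :=
    fun kk => pvSnapshot_eq initial solved (pvNCoords initial) hbnd kk
  have hR : (List.range ((pvNCoords initial).length + 1)).map
        ((pvSnapshot initial solved ((pvNCoords initial).map pvEmb)) ∘ (fun kk : Nat => (kk : Int)))
      = (List.range ((pvNCoords initial).length + 1)).map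
        (fun kk : Nat => pvApplyN solved initial ((pvNCoords initial).take kk)) :=
    List.map_congr_left (fun kk _ => hsnap kk)
  rw [hR, List.range_succ_eq_map, List.map_cons, List.map_map]
  have h0 : pvApplyN solved initial ((pvNCoords initial).take 0) = initial := rfl
  rw [h0]
  have hL : ∀ kk : Nat,
      (((pvNCoords initial).map pvEmb).take (kk + 1)).foldl (pvFill solved) initial
        = pvApplyN solved initial ((pvNCoords initial).take (kk + 1)) := by
    intro kk
    rw [← List.map_take]
    exact pvFoldPre initial solved ((pvNCoords initial).take (kk + 1))
  rw [List.map_congr_left (fun kk _ => hL kk)]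
  simp [Function.comp, Nat.succ_eq_add_one]
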